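-- pv_equiv track=rewrite | github.com/need-singularity/sylvian-singularity | math/tools/identity_finder.py | sigma_k
-- ===== SOURCE A (Python) =====
-- def sigma_k(n, k):
--     """Sum of k-th powers of divisors."""
--     if n < 1:
--         return 0
--     s = 0
--     for i in range(1, int(n**0.5) + 1):
--         if n % i == 0:
--             s += i**k
--             if i * i != n:
--                 s += (n // i)**k
--     return s
-- ===== SOURCE B (Python) =====
-- def _factor(k, p, a):
--     """sigma_k of the prime power p**a: divisor count a+1 for k == 0,
--     else the geometric-series closed form (exact integer division)."""
--     return (a + 1) if k == 0 else (p ** ((a + 1) * k) - 1) // (p ** k - 1)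
--
--
-- def sigma_k(n, k):
--     """Sum of k-th powers of divisors, computed as a product over the
--     prime factorization of n (trial division up to sqrt of the remaining part)."""
--     if n < 1:
--         return 0
--     result = 1
--     m = n
--     p = 2
--     while p * p <= m:
--         if m % p == 0:
--             a = 0
--             while m % p == 0:
--                 m //= p
--                 a += 1
--             result *= _factor(k, p, a)
--         p += 1
--     if m > 1:
--         result *= _factor(k, m, 1)
--     return result
-- ===== Notes on version B (the rewrite author's own statement) =====
-- stated objective: alternative
-- what changed: Replaces divisor enumeration up to sqrt(n) with trial-division prime factorization and the multiplicative closed form prod (p^((a+1)k)-1)/(p^k-1) (divisor count prod(a+1) for k=0).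
-- outside the precondition, e.g. on sigma_k(6, -1): A returns 2.0, B returns 1.0
import Mathlib
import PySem

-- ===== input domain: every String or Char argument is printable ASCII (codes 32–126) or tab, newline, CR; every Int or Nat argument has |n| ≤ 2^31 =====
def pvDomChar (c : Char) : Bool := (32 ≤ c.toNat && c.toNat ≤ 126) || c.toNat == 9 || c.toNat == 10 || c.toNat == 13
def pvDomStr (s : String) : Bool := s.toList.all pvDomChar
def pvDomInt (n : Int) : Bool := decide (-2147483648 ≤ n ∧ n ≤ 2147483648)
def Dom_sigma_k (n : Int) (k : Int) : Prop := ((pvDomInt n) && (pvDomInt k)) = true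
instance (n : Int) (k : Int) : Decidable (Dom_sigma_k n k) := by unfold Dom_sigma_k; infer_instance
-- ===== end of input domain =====

-- B replaces A's divisor enumeration up to sqrt(n) by trial-division prime factorization with the
-- multiplicative closed form for the divisor-power sum (a different algorithm of similar cost).

-- ===== PORT A =====
-- int(n**0.5) is ported as Nat.sqrt n.toNat: exact on the domain |n| ≤ 2^31 (the float sqrt error
-- there is far below the gap to the next integer; checked against CPython).
-- i**k is ported as i ^ k.toNat: exact for 0 ≤ k (Pre_ excludes k < 0 with n ≥ 1, where Python
-- computes floats).
def sigma_k (n : Int) (k : Int) : Int :=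
  if n < 1 then 0
  else
    (PySem.List.pyRange 1 ((Nat.sqrt n.toNat : Int) + 1) 1).foldl
      (fun s i =>
        if PySem.Int.mod n i = 0 then
          let s := s + i ^ k.toNat
          if i * i ≠ n then s + (PySem.Int.floordiv n i) ^ k.toNat else s
        else s) 0

-- ===== PORT B =====
-- inner loop 'while m % p == 0: m //= p; a += 1' (fuel m.toNat is a totality guard only)
def sigma_k_divOut (p : Int) : Int → Nat → Int × Int
  | m, 0 => (m, 0)
  | m, fuel + 1 =>
    if PySem.Int.mod m p = 0 then
      let r := sigma_k_divOut p (PySem.Int.floordiv m p) fuel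
      (r.1, r.2 + 1)
    else (m, 0)

-- _factor(k, p, a) of Source B; exponentiation exact for 0 ≤ k (see Pre_)
def sigma_k_factor (k : Int) (p : Int) (a : Int) : Int :=
  if k = 0 then a + 1
  else PySem.Int.floordiv (p ^ ((a + 1) * k).toNat - 1) (p ^ k.toNat - 1)

-- outer loop 'while p * p <= m: …' plus the trailing 'if m > 1' (fuel is a totality guard only)
def sigma_k_loop (k : Int) : Nat → Int → Int → Int → Int
  | fuel, p, m, result =>
    if p * p ≤ m then
      match fuel with
      | 0 => result
      | fuel + 1 =>
        if PySem.Int.mod m p = 0 then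
          let r := sigma_k_divOut p m m.toNat
          sigma_k_loop k fuel (p + 1) r.1 (result * sigma_k_factor k p r.2)
        else sigma_k_loop k fuel (p + 1) m result
    else if 1 < m then result * sigma_k_factor k m 1 else result

def sigma_k_alt (n : Int) (k : Int) : Int :=
  if n < 1 then 0 else sigma_k_loop k (n.toNat + 2) 2 n 1

-- ===== PRECONDITION & SPEC =====
-- Pre_ excludes n ≥ 1 with k < 0: there Python's i**k is a float, so A returns a float (not an int).
def Pre_sigma_k (n : Int) (k : Int) : Prop := 0 ≤ k ∨ n < 1
instance (n : Int) (k : Int) : Decidable (Pre_sigma_k n k) := by unfold Pre_sigma_k; infer_instance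
def pvWitness_sigma_k : Int × Int := (12, 2)

def Spec_sigma_k (n : Int) (k : Int) (out : Int) : Prop := out = sigma_k_alt n k
instance (n : Int) (k : Int) (out : Int) : Decidable (Spec_sigma_k n k out) := by unfold Spec_sigma_k; infer_instance

-- ===== CLAIM (what is proved, stated in full; the proofs are below) =====
def Claim_equal_sigma_k : Prop := ∀ (n : Int) (k : Int), Dom_sigma_k n k → Pre_sigma_k n k → Spec_sigma_k n k (sigma_k n k)

-- ===== LEMMAS AND PROOFS =====

-- the common value: both programs compute sigma_{k.toNat}(n.toNat) = sum of e-th powers of divisors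

-- A-side: the sqrt-paired divisor sum equals the plain divisor sum (generic in the summand g)
theorem pv_pair_sum {M : Type} [AddCommMonoid M] (N : ℕ) (hN : 1 ≤ N) (g : ℕ → M) :
    (∑ i ∈ Finset.Ico 1 (Nat.sqrt N + 1),
      (if N % i = 0 then g i + (if i * i ≠ N then g (N / i) else 0) else 0))
    = ∑ d ∈ N.divisors, g d := by
  set r := Nat.sqrt N with hr
  have hrr : r ^ 2 ≤ N := Nat.sqrt_le' N
  have hrs : N < (r + 1) ^ 2 := Nat.lt_succ_sqrt' N
  have hmod : ∀ i ∈ Finset.Ico 1 (r + 1),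
      (if N % i = 0 then g i + (if i * i ≠ N then g (N / i) else 0) else 0)
      = (if i ∣ N then g i + (if i * i ≠ N then g (N / i) else 0) else 0) := by
    intro i hi
    rw [Finset.mem_Ico] at hi
    exact if_congr (Iff.symm Nat.dvd_iff_mod_eq_zero) rfl rfl
  rw [Finset.sum_congr rfl hmod, ← Finset.sum_filter]
  have hset : (Finset.Ico 1 (r + 1)).filter (· ∣ N) = N.divisors.filter (· ≤ r) := by
    ext i
    simp only [Finset.mem_filter, Finset.mem_Ico, Nat.mem_divisors]
    constructor
    · rintro ⟨⟨h1, h2⟩, hd⟩; exact ⟨⟨hd, by omega⟩, by omega⟩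
    · rintro ⟨⟨hd, _⟩, hle⟩
      exact ⟨⟨Nat.pos_of_dvd_of_pos hd (by omega), by omega⟩, hd⟩
  rw [hset, Finset.sum_add_distrib, ← Finset.sum_filter]
  have hbij : ∑ i ∈ (N.divisors.filter (· ≤ r)).filter (fun i => i * i ≠ N), g (N / i)
      = ∑ d ∈ N.divisors.filter (fun d => ¬ d ≤ r), g d := by
    apply Finset.sum_nbij' (i := fun a => N / a) (j := fun b => N / b)
    · intro a ha
      simp only [Finset.mem_filter, Nat.mem_divisors] at ha ⊢
      obtain ⟨⟨⟨hd, hN0⟩, hler⟩, hne⟩ := ha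
      have ha1 : 0 < a := Nat.pos_of_dvd_of_pos hd (by omega)
      have hq : N / a * a = N := Nat.div_mul_cancel hd
      have haN : a * a < N := by
        have h1 : a * a ≤ r * r := Nat.mul_le_mul hler hler
        have h2 : r * r ≤ N := by nlinarith [hrr]
        omega
      refine ⟨⟨Nat.div_dvd_of_dvd hd, hN0⟩, ?_⟩
      have : N < (N / a) ^ 2 := by nlinarith
      have := Nat.sqrt_lt'.2 this
      omega
    · intro b hb
      simp only [Finset.mem_filter, Nat.mem_divisors] at hb ⊢
      obtain ⟨⟨hd, hN0⟩, hgt⟩ := hb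
      have hb1 : 0 < b := Nat.pos_of_dvd_of_pos hd (by omega)
      have hq : N / b * b = N := Nat.div_mul_cancel hd
      have hle : N / b ≤ r := by
        have : N / b < r + 1 := (Nat.div_lt_iff_lt_mul hb1).2 (by nlinarith)
        omega
      refine ⟨⟨⟨Nat.div_dvd_of_dvd hd, hN0⟩, hle⟩, ?_⟩
      intro hEq
      have ht1 : 0 < N / b := by
        rcases Nat.eq_zero_or_pos (N / b) with h | h
        · rw [h] at hq; omega
        · exact h
      have : N / b = b := by nlinarith
      omega
    · intro a ha
      simp only [Finset.mem_filter, Nat.mem_divisors] at ha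
      exact Nat.div_div_self ha.1.1.1 (by omega)
    · intro b hb
      simp only [Finset.mem_filter, Nat.mem_divisors] at hb
      exact Nat.div_div_self hb.1.1 (by omega)
    · intro a _; rfl
  rw [hbij, Finset.sum_filter_add_sum_filter_not]


theorem pv_A_eq_sigma (n k : Int) (hn : 1 ≤ n) (_hk : 0 ≤ k) :
    sigma_k n k = ((ArithmeticFunction.sigma k.toNat n.toNat : ℕ) : ℤ) := by
  set e := k.toNat with he
  set N := n.toNat with hNdef
  have hN : 1 ≤ N := by omega
  have hn' : n = (N : ℤ) := by omega
  set G : ℤ → ℤ := fun i =>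
    if PySem.Int.mod n i = 0 then
      i ^ e + (if i * i ≠ n then (PySem.Int.floordiv n i) ^ e else 0)
    else 0 with hG
  rw [sigma_k, if_neg (by omega : ¬ n < 1)]
  have hbody : (fun (s i : ℤ) =>
      if PySem.Int.mod n i = 0 then
        let s := s + i ^ k.toNat
        if i * i ≠ n then s + (PySem.Int.floordiv n i) ^ k.toNat else s
      else s) = fun s i => s + G i := by
    funext s i
    simp only [hG, ← he]
    split_ifs <;> ring
  rw [hbody, PySem.List.foldl_add, zero_add]
  rw [PySem.List.pyRange_one]
  have hlen : ((Nat.sqrt N : ℤ) + 1 - 1).toNat = Nat.sqrt N := by omega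
  rw [hlen, List.map_map]
  have hsum : ((List.range (Nat.sqrt N)).map (G ∘ fun j : ℕ => 1 + (j : ℤ))).sum
      = ∑ j ∈ Finset.range (Nat.sqrt N), G (1 + (j : ℤ)) := rfl
  rw [hsum]
  have hre : ∑ j ∈ Finset.range (Nat.sqrt N), G (1 + (j : ℤ))
      = ∑ i ∈ Finset.Ico 1 (Nat.sqrt N + 1), G (i : ℤ) := by
    rw [Finset.sum_Ico_eq_sum_range]
    apply Finset.sum_congr (by norm_num)
    intro j _
    push_cast
    ring_nf
  rw [hre]
  have hptw : ∀ i ∈ Finset.Ico 1 (Nat.sqrt N + 1),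
      G (i : ℤ) = (if N % i = 0 then ((i:ℤ))^e + (if i * i ≠ N then ((N / i : ℕ) : ℤ)^e else 0) else 0) := by
    intro i hi
    rw [Finset.mem_Ico] at hi
    simp only [hG, hn', PySem.Int.mod_natCast, PySem.Int.floordiv_natCast]
    have c2 : ((i:ℤ) * (i:ℤ) ≠ ((N:ℕ):ℤ)) ↔ (i * i ≠ N) := by
      constructor <;> intro h hEq <;> apply h <;> exact_mod_cast hEq
    exact if_congr Nat.cast_eq_zero (congrArg (HAdd.hAdd _) (if_congr c2 rfl rfl)) rfl
  rw [Finset.sum_congr rfl hptw, pv_pair_sum N hN (fun d => ((d : ℤ))^e)]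
  rw [ArithmeticFunction.sigma_apply]
  push_cast
  rfl

-- B-side lemmas

theorem pv_factor_eq (k : Int) (hk : 0 ≤ k) (q a : ℕ) (hq : q.Prime) :
    sigma_k_factor k (q : ℤ) (a : ℤ) = ((ArithmeticFunction.sigma k.toNat (q ^ a) : ℕ) : ℤ) := by
  unfold sigma_k_factor
  by_cases hk0 : k = 0
  · subst hk0
    simp [ArithmeticFunction.sigma_zero_apply, Nat.divisors_prime_pow hq]
  · have hke : k = (k.toNat : ℤ) := (Int.toNat_of_nonneg hk).symm
    set e := k.toNat with hedef
    have he : 1 ≤ e := by omega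
    rw [if_neg hk0]
    have hexp : (((a : ℤ) + 1) * k).toNat = (a + 1) * e := by
      have h1 : ((a:ℤ) + 1) * k = (((a + 1) * e : ℕ) : ℤ) := by rw [hke]; push_cast; ring
      rw [h1, Int.toNat_natCast]
    rw [hexp]
    set x : ℤ := (q : ℤ) ^ e with hxdef
    have hx2 : 1 < x := one_lt_pow₀ (by exact_mod_cast hq.one_lt) (by omega)
    have hpow : (q : ℤ) ^ ((a + 1) * e) = x ^ (a + 1) := by rw [mul_comm, pow_mul]
    have hgeo : (q:ℤ) ^ ((a+1)*e) - 1 = (∑ i ∈ Finset.range (a+1), x ^ i) * (x - 1) := by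
      rw [hpow, geom_sum_mul]
    rw [hgeo, PySem.Int.floordiv_eq_ediv_of_pos (by omega), Int.mul_ediv_cancel _ (by omega)]
    rw [ArithmeticFunction.sigma_apply, Nat.sum_divisors_prime_pow hq]
    push_cast
    apply Finset.sum_congr rfl
    intro i _
    rw [hxdef, ← pow_mul, ← pow_mul, mul_comm]


theorem pv_divOut_spec (p : Int) (hp : 2 ≤ p) :
    ∀ (fuel : Nat) (m : Int), 1 ≤ m → m.toNat ≤ fuel →
      1 ≤ (sigma_k_divOut p m fuel).1 ∧ 0 ≤ (sigma_k_divOut p m fuel).2 ∧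
      m = (sigma_k_divOut p m fuel).1 * p ^ (sigma_k_divOut p m fuel).2.toNat ∧
      ¬ p ∣ (sigma_k_divOut p m fuel).1 := by
  intro fuel
  induction fuel with
  | zero => intro m hm hf; omega
  | succ fuel ih =>
    intro m hm hf
    by_cases hdvd : p ∣ m
    · have hmod : PySem.Int.mod m p = 0 := (PySem.Int.mod_eq_zero_iff_dvd m p).2 hdvd
      have hfd : PySem.Int.floordiv m p = m / p := PySem.Int.floordiv_eq_ediv_of_pos (by omega)
      have hmp : m = m / p * p := (Int.ediv_mul_cancel hdvd).symm
      have h1 : 1 ≤ m / p := by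
        rcases hdvd with ⟨c, hc⟩
        have : 0 < c := by nlinarith
        rw [hc, Int.mul_ediv_cancel_left _ (by omega)]; omega
      have h2 : (m / p).toNat ≤ fuel := by
        have hlt : m / p < m := by nlinarith
        omega
      have := ih (m / p) h1 h2
      simp only [sigma_k_divOut, hmod, hfd, if_true]
      obtain ⟨ha, hb, hc, hd⟩ := this
      refine ⟨ha, by omega, ?_, hd⟩
      have : ((sigma_k_divOut p (m / p) fuel).2 + 1).toNat
           = (sigma_k_divOut p (m / p) fuel).2.toNat + 1 := by omega
      rw [this, pow_succ, ← mul_assoc, ← hc]; omega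
    · have hmod : PySem.Int.mod m p ≠ 0 := fun h => hdvd ((PySem.Int.mod_eq_zero_iff_dvd m p).1 h)
      simp only [sigma_k_divOut, if_neg hmod]
      exact ⟨hm, le_refl 0, by simp, hdvd⟩


theorem pv_tail (k : Int) (hk : 0 ≤ k) (p m result : Int) (hp : 2 ≤ p) (hm : 1 ≤ m)
    (hmin : ∀ q : ℕ, q.Prime → (q : ℤ) ∣ m → p ≤ (q : ℤ)) (hlt : m < p * p) :
    (if 1 < m then result * sigma_k_factor k m 1 else result)
      = result * ((ArithmeticFunction.sigma k.toNat m.toNat : ℕ) : ℤ) := by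
  by_cases h1 : 1 < m
  · rw [if_pos h1]
    have hM : ((m.toNat : ℤ)) = m := Int.toNat_of_nonneg (by omega)
    have hMp : m.toNat.Prime := by
      by_contra hnp
      have hq := Nat.minFac_prime (by omega : m.toNat ≠ 1)
      have hdvd : ((m.toNat.minFac : ℕ) : ℤ) ∣ m := by
        rw [← hM]; exact_mod_cast m.toNat.minFac_dvd
      have hge := hmin _ hq hdvd
      have hsq := Nat.minFac_sq_le_self (by omega : 0 < m.toNat) hnp
      have hsq' : ((m.toNat.minFac : ℤ)) ^ 2 ≤ m := by
        rw [← hM]; exact_mod_cast hsq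
      nlinarith
    have hfac := pv_factor_eq k hk m.toNat 1 hMp
    rw [pow_one] at hfac
    rw [← hM, show ((1:ℤ)) = ((1:ℕ):ℤ) by norm_num, hfac, Int.toNat_natCast]
  · rw [if_neg h1]
    have : m = 1 := by omega
    subst this
    simp [(ArithmeticFunction.isMultiplicative_sigma (k := k.toNat)).map_one]


theorem pv_loop_eq (k : Int) (hk : 0 ≤ k) :
    ∀ (fuel : Nat) (p m result : Int), 2 ≤ p → 1 ≤ m →
      (∀ q : ℕ, q.Prime → (q : ℤ) ∣ m → p ≤ (q : ℤ)) →
      m.toNat < (p.toNat + fuel) ^ 2 →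
      sigma_k_loop k fuel p m result
        = result * ((ArithmeticFunction.sigma k.toNat m.toNat : ℕ) : ℤ) := by
  intro fuel
  induction fuel with
  | zero =>
    intro p m result hp hm hmin hfuel
    have hP : ((p.toNat : ℤ)) = p := Int.toNat_of_nonneg (by omega)
    have hple : ¬ (p * p ≤ m) := by
      intro h
      have : ((p.toNat * p.toNat : ℕ) : ℤ) ≤ m := by push_cast [hP]; exact h
      have h2 : p.toNat * p.toNat ≤ m.toNat := by omega
      simp [pow_two] at hfuel; omega
    rw [sigma_k_loop, if_neg hple]
    exact pv_tail k hk p m result hp hm hmin (by omega)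
  | succ fuel ih =>
    intro p m result hp hm hmin hfuel
    rw [sigma_k_loop]
    by_cases hple : p * p ≤ m
    · rw [if_pos hple]
      have hP : ((p.toNat : ℤ)) = p := Int.toNat_of_nonneg (by omega)
      by_cases hdvd : p ∣ m
      · -- p is the least prime factor of m, hence prime
        have hPp : p.toNat.Prime := by
          have hq := Nat.minFac_prime (by omega : p.toNat ≠ 1)
          have hdvd' : ((p.toNat.minFac : ℕ) : ℤ) ∣ m := by
            calc ((p.toNat.minFac : ℕ) : ℤ) ∣ (p.toNat : ℤ) := by exact_mod_cast p.toNat.minFac_dvd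
            _ = p := hP
            _ ∣ m := hdvd
          have hge := hmin _ hq hdvd'
          have hle : p.toNat.minFac ≤ p.toNat := Nat.minFac_le (by omega)
          have : p.toNat.minFac = p.toNat := by omega
          rw [← this]; exact hq
        have hmod : PySem.Int.mod m p = 0 := (PySem.Int.mod_eq_zero_iff_dvd m p).2 hdvd
        rw [if_pos hmod]
        obtain ⟨hR1, hR2, hmEq, hnd⟩ :=
          pv_divOut_spec p hp m.toNat m hm (le_refl _)
        set R := sigma_k_divOut p m m.toNat with hRdef
        have hA : ((R.2.toNat : ℤ)) = R.2 := Int.toNat_of_nonneg hR2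
        have hM' : ((R.1.toNat : ℤ)) = R.1 := Int.toNat_of_nonneg (by omega)
        -- the Nat-level factorization
        have hMeq : m.toNat = R.1.toNat * p.toNat ^ R.2.toNat := by
          have : ((R.1.toNat * p.toNat ^ R.2.toNat : ℕ) : ℤ) = m := by
            push_cast [hM', hP]; omega
          omega
        have hndN : ¬ p.toNat ∣ R.1.toNat := by
          intro h
          exact hnd (by rw [← hP, ← hM'] at *; exact_mod_cast h)
        have hcop : (R.1.toNat).Coprime (p.toNat ^ R.2.toNat) :=
          (Nat.Coprime.pow_left _ ((hPp.coprime_iff_not_dvd.2 hndN))).symm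
        have hmul := ArithmeticFunction.IsMultiplicative.map_mul_of_coprime
          (ArithmeticFunction.isMultiplicative_sigma (k := k.toNat)) hcop
        have hR1dvd : R.1 ∣ m := ⟨p ^ R.2.toNat, hmEq⟩
        have hrec := ih (p + 1) R.1 (result * sigma_k_factor k p R.2) (by omega) (by omega)
          (by
            intro q hq hqd
            have h1 : (q : ℤ) ∣ m := hqd.trans hR1dvd
            have h2 := hmin q hq h1
            have hne : (q : ℤ) ≠ p := by
              intro h
              apply hndN
              have : q = p.toNat := by omega
              rw [← this]
              have : (q : ℤ) ∣ R.1 := hqd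
              rw [← hM'] at this
              exact_mod_cast this
            omega)
          (by
            have hle : R.1 ≤ m := Int.le_of_dvd (by omega) hR1dvd
            have hbase : (p + 1).toNat + fuel = p.toNat + (fuel + 1) := by omega
            rw [hbase]
            omega)
        rw [hrec, hMeq, hmul]
        have hfac := pv_factor_eq k hk p.toNat R.2.toNat hPp
        rw [hP, hA] at hfac
        rw [hfac]
        push_cast
        ring
      · have hmod : PySem.Int.mod m p ≠ 0 :=
          fun h => hdvd ((PySem.Int.mod_eq_zero_iff_dvd m p).1 h)
        rw [if_neg hmod]
        apply ih (p + 1) m result (by omega) hm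
        · intro q hq hqd
          have h2 := hmin q hq hqd
          have hne : (q : ℤ) ≠ p := by
            intro h
            apply hdvd
            rw [← h]; exact hqd
          omega
        · have hbase : (p + 1).toNat + fuel = p.toNat + (fuel + 1) := by omega
          rw [hbase]; exact hfuel
    · rw [if_neg hple]
      exact pv_tail k hk p m result hp hm hmin (by omega)


theorem pv_B_eq_sigma (n k : Int) (hn : 1 ≤ n) (hk : 0 ≤ k) :
    sigma_k_alt n k = ((ArithmeticFunction.sigma k.toNat n.toNat : ℕ) : ℤ) := by
  rw [sigma_k_alt, if_neg (by omega : ¬ n < 1)]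
  rw [pv_loop_eq k hk (n.toNat + 2) 2 n 1 (by norm_num) hn
    (fun q hq _ => by exact_mod_cast hq.two_le)
    (by
      have h2 : ((2:ℤ)).toNat + (n.toNat + 2) = n.toNat + 4 := by omega
      rw [h2]; nlinarith)]
  ring

-- ===== VERDICT (by name: the statement is the Claim_ definition above) =====
theorem sigma_k_spec : Claim_equal_sigma_k := by
  intro n k _hdom hpre
  unfold Spec_sigma_k
  by_cases hn : n < 1
  · simp [sigma_k, sigma_k_alt, hn]
  · have hn' : 1 ≤ n := by omega
    have hk : 0 ≤ k := hpre.resolve_right hn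
    rw [pv_A_eq_sigma n k hn' hk, pv_B_eq_sigma n k hn' hk]
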